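-- pv_equiv track=rewrite | github.com/serj93/patents-claim-handler | tools/convhandler.py | getSecondPOS
-- ===== SOURCE A (Python) =====
-- def getSecondPOS(morph, pos):
--     result = None
--     first_pos = False
--     for token in morph:
--         if token['pos'] == pos:
--             if first_pos:
--                 result = token
--                 break
--             else:
--                 first_pos = True
--     return result
-- ===== SOURCE B (Python) =====
-- def getSecondPOS(morph, pos):
--     matches = [token for token in morph if token.get('pos') == pos]
--     return matches[1] if len(matches) > 1 else None
-- ===== Notes on version B (the rewrite author's own statement) =====
-- stated objective: simpler
-- what changed: Replaces the stateful flag-and-early-break scan with a collect-all-matches comprehension followed by indexing matches[1]; Pre_ excludes only inputs where A raises KeyError.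
import Mathlib
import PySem

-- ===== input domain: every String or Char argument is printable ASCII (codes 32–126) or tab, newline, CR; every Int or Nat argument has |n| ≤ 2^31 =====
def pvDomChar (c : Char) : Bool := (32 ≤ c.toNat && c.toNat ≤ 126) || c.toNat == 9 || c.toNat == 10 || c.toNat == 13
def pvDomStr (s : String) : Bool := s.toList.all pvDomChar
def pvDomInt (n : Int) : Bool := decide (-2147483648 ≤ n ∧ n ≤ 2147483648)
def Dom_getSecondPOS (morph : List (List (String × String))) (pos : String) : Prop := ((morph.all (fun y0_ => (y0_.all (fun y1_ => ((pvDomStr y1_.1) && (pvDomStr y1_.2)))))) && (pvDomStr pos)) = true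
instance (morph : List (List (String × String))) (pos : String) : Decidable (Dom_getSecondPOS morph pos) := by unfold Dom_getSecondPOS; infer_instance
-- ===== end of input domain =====

-- B replaces A's flag-and-early-break scan by collecting all matching tokens and indexing the second (objective: simpler).

-- ===== PORT A =====
-- A's loop with state (result, first_pos); token['pos'] is a first-match assoc lookup, a
-- missing 'pos' key is a KeyError (excluded by Pre_; the port returns none there, arbitrarily).
def getSecondPOS_loop (morph : List (List (String × String))) (pos : String)
    (first_pos : Bool) : Option (List (String × String)) :=
  match morph with
  | [] => none
  | token :: rest =>
    match token.lookup "pos" with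
    | none => none   -- Python raises KeyError here; outside Pre_
    | some v =>
      if v == pos then
        if first_pos then some token
        else getSecondPOS_loop rest pos true
      else getSecondPOS_loop rest pos first_pos

def getSecondPOS (morph : List (List (String × String))) (pos : String) : Option (List (String × String)) :=
  getSecondPOS_loop morph pos false

-- ===== PORT B =====
def getSecondPOS_alt (morph : List (List (String × String))) (pos : String) : Option (List (String × String)) :=
  let ms := morph.filter (fun token => token.lookup "pos" == some pos)
  if 1 < ms.length then PySem.List.pyGet? ms 1 else none

-- ===== PRECONDITION & SPEC =====
-- Exactly the inputs on which A returns: either every token has a 'pos' key, or the second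
-- matching token occurs before the first keyless token (A breaks there); otherwise A raises KeyError.
def Pre_getSecondPOS (morph : List (List (String × String))) (pos : String) : Prop :=
  (∀ t ∈ morph, (t.lookup "pos").isSome = true) ∨
  2 ≤ (morph.takeWhile (fun t => (t.lookup "pos").isSome)).countP
        (fun t => t.lookup "pos" == some pos)
instance (morph : List (List (String × String))) (pos : String) : Decidable (Pre_getSecondPOS morph pos) := by unfold Pre_getSecondPOS; infer_instance

def pvWitness_getSecondPOS : (List (List (String × String))) × String :=
  ([[("pos", "N"), ("w", "cat")], [("pos", "V")], [("pos", "N")]], "N")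

def Spec_getSecondPOS (morph : List (List (String × String))) (pos : String) (out : Option (List (String × String))) : Prop := out = getSecondPOS_alt morph pos
instance (morph : List (List (String × String))) (pos : String) (out : Option (List (String × String))) : Decidable (Spec_getSecondPOS morph pos out) := by unfold Spec_getSecondPOS; infer_instance

-- ===== CLAIM (what is proved, stated in full; the proofs are below) =====
def Claim_equal_getSecondPOS : Prop := ∀ (morph : List (List (String × String))) (pos : String), Dom_getSecondPOS morph pos → Pre_getSecondPOS morph pos → Spec_getSecondPOS morph pos (getSecondPOS morph pos)

-- ===== LEMMAS AND PROOFS =====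

-- A's loop with the flag already set returns the FIRST match, i.e. the head of the filtered list,
-- provided A does not hit a keyless token before it.
theorem loop_true_eq_head (morph : List (List (String × String))) (pos : String)
    (h : (∀ t ∈ morph, (t.lookup "pos").isSome = true) ∨
         1 ≤ (morph.takeWhile (fun t => (t.lookup "pos").isSome)).countP
               (fun t => t.lookup "pos" == some pos)) :
    getSecondPOS_loop morph pos true =
      (morph.filter (fun t => t.lookup "pos" == some pos)).head? := by
  induction morph with
  | nil => simp [getSecondPOS_loop]
  | cons t rest ih =>
    cases hl : t.lookup "pos" with
    | none =>
      exfalso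
      rcases h with h | h
      · have := h t (by simp); simp [hl] at this
      · simp [List.takeWhile, hl] at h
    | some v =>
      by_cases hv : v = pos
      · rw [List.filter_cons_of_pos (by simp [hl, hv])]
        simp [getSecondPOS_loop, hl, hv]
      · have h' : (∀ u ∈ rest, (u.lookup "pos").isSome = true) ∨
            1 ≤ (rest.takeWhile (fun u => (u.lookup "pos").isSome)).countP
                  (fun u => u.lookup "pos" == some pos) := by
          rcases h with h | h
          · exact Or.inl (fun u hu => h u (by simp [hu]))
          · right
            simp only [List.takeWhile_cons, hl, Option.isSome_some, if_true,
              List.countP_cons] at h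
            simpa [hv] using h
        rw [List.filter_cons_of_neg (by simp [hl, hv])]
        simp [getSecondPOS_loop, hl, hv, ih h']

-- A's loop with the flag unset returns the SECOND match (index 1 of the filtered list).
theorem loop_false_eq_get1 (morph : List (List (String × String))) (pos : String)
    (h : (∀ t ∈ morph, (t.lookup "pos").isSome = true) ∨
         2 ≤ (morph.takeWhile (fun t => (t.lookup "pos").isSome)).countP
               (fun t => t.lookup "pos" == some pos)) :
    getSecondPOS_loop morph pos false =
      (morph.filter (fun t => t.lookup "pos" == some pos))[1]? := by
  induction morph with
  | nil => simp [getSecondPOS_loop]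
  | cons t rest ih =>
    cases hl : t.lookup "pos" with
    | none =>
      exfalso
      rcases h with h | h
      · have := h t (by simp); simp [hl] at this
      · simp [List.takeWhile, hl] at h
    | some v =>
      by_cases hv : v = pos
      · have h' : (∀ u ∈ rest, (u.lookup "pos").isSome = true) ∨
            1 ≤ (rest.takeWhile (fun u => (u.lookup "pos").isSome)).countP
                  (fun u => u.lookup "pos" == some pos) := by
          rcases h with h | h
          · exact Or.inl (fun u hu => h u (by simp [hu]))
          · right
            simp only [List.takeWhile_cons, hl, Option.isSome_some, if_true,
              List.countP_cons] at h
            simp only [hv, beq_self_eq_true, if_true] at h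
            omega
        rw [List.filter_cons_of_pos (by simp [hl, hv])]
        rw [List.getElem?_cons_succ, ← List.head?_eq_getElem?]
        simp [getSecondPOS_loop, hl, hv, loop_true_eq_head rest pos h']
      · have h' : (∀ u ∈ rest, (u.lookup "pos").isSome = true) ∨
            2 ≤ (rest.takeWhile (fun u => (u.lookup "pos").isSome)).countP
                  (fun u => u.lookup "pos" == some pos) := by
          rcases h with h | h
          · exact Or.inl (fun u hu => h u (by simp [hu]))
          · right
            simp only [List.takeWhile_cons, hl, Option.isSome_some, if_true,
              List.countP_cons] at h
            simpa [hv] using h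
        rw [List.filter_cons_of_neg (by simp [hl, hv])]
        simp [getSecondPOS_loop, hl, hv, ih h']

-- ===== VERDICT (by name: the statement is the Claim_ definition above) =====
theorem getSecondPOS_spec : Claim_equal_getSecondPOS := by
  intro morph pos _ hpre
  unfold Spec_getSecondPOS getSecondPOS getSecondPOS_alt
  rw [loop_false_eq_get1 morph pos hpre]
  set ms := morph.filter (fun t => t.lookup "pos" == some pos) with hms
  by_cases hlen : 1 < ms.length
  · rw [if_pos hlen]
    simp [PySem.List.pyGet?, PySem.List.pyIdx?, hlen]
  · rw [if_neg hlen]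
    exact List.getElem?_eq_none (by omega)
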